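-- pv_equiv track=rewrite | github.com/pypi-data/pypi-mirror-401 | packages/iflow-mcp_jakeyshakey_analytics-service/iflow_mcp_jakeyshakey_analytics_service-0.1.0-py3-none-any.whl/analytics_service/embeddings.py | smart_chunk_selection
-- ===== SOURCE A (Python) =====
-- def smart_chunk_selection(chunks_per_user, max_total_chunks=100):
--     """
--     Select a balanced representation of chunks from each user's journey.
--     """
--     total_users = len(chunks_per_user)
--     chunks_per_user_limit = max(1, max_total_chunks // total_users)
--
--     selected_chunks = []
--     for user_chunks in chunks_per_user:
--         # Select evenly spaced chunks to represent the user's journey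
--         step = max(1, len(user_chunks) // chunks_per_user_limit)
--         selected_chunks.extend(user_chunks[::step][:chunks_per_user_limit])
--
--     # If we still have too many chunks, trim evenly
--     while len(selected_chunks) > max_total_chunks:
--         selected_chunks = selected_chunks[::2]
--
--     return selected_chunks
-- ===== SOURCE B (Python) =====
-- def _spaced(user_chunks, limit):
--     # evenly spaced chunks for one user, as a single extended slice
--     step = max(1, len(user_chunks) // limit)
--     return user_chunks[:limit * step:step]
--
--
-- def smart_chunk_selection(chunks_per_user, max_total_chunks=100):
--     """
--     Select a balanced representation of chunks from each user's journey.
--     """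
--     limit = max(1, max_total_chunks // len(chunks_per_user))
--     selected = [c for user in chunks_per_user for c in _spaced(user, limit)]
--     n = len(selected)
--     if n <= max_total_chunks:
--         return selected
--     # closed form: k halvings so that ceil(n / 2**k) <= max_total_chunks
--     halvings = (-(-n // max_total_chunks) - 1).bit_length()
--     return selected[::1 << halvings]
-- ===== Notes on version B (the rewrite author's own statement) =====
-- stated objective: simpler
-- what changed: The per-user extend-loop with a slice-then-truncate becomes a flat comprehension of single extended slices user[:limit*step:step], and the repeated-halving while-loop at the end is replaced by a closed-form bit_length computation of the number of halvings applied as one slice selected[::2**k].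
import Mathlib
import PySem

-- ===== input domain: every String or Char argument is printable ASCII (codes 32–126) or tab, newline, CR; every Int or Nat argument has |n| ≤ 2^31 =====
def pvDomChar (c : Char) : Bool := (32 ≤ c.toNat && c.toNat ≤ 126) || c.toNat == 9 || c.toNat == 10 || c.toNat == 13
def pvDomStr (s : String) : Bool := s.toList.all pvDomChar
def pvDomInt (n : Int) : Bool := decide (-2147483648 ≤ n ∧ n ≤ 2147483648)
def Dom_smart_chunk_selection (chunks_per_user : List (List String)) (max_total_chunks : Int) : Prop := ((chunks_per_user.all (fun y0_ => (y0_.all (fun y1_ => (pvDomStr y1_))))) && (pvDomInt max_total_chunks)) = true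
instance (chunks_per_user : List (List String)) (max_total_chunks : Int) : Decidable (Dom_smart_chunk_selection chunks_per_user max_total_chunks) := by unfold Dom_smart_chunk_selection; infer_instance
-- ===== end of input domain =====

-- B replaces A's extend-loop + repeated-halving while-loop by a flat comprehension of single
-- extended slices and a closed-form bit-length computation of the number of halvings (objective: simpler).

-- ===== PORT A =====

-- A's trailing `while len(selected_chunks) > max_total_chunks: selected_chunks = selected_chunks[::2]`.
-- When the length stops shrinking (length ≤ 1 but still > max_total_chunks, i.e. max_total_chunks ≤ 0)
-- the Python loop never terminates; that case is outside Pre_ and the inner guard below only makes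
-- the recursion total.
def pvTrimA (sel : List String) (m : Int) : List String :=
  if (sel.length : Int) > m then
    let sel' := (PySem.List.slice? sel none none 2).getD []
    if _h : sel'.length < sel.length then pvTrimA sel' m
    else sel'
  else sel
termination_by sel.length

-- `max_total_chunks // total_users` raises ZeroDivisionError in Python when chunks_per_user == []
-- (excluded by Pre_); `[::step]` always has step ≥ 1 so slice? is never none and `.getD []` is exact.
def smart_chunk_selection (chunks_per_user : List (List String)) (max_total_chunks : Int) : List String :=
  let total_users : Int := chunks_per_user.length
  let chunks_per_user_limit := max 1 (PySem.Int.floordiv max_total_chunks total_users)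
  let selected_chunks := chunks_per_user.foldl
    (fun acc user_chunks =>
      let step := max 1 (PySem.Int.floordiv (user_chunks.length : Int) chunks_per_user_limit)
      acc ++ PySem.List.slice ((PySem.List.slice? user_chunks none none step).getD []) none
        (some chunks_per_user_limit)) []
  pvTrimA selected_chunks max_total_chunks

-- ===== PORT B =====

-- Source B's `_spaced`: one extended slice `user_chunks[:limit * step:step]` (step ≥ 1, never none).
def pvSpaced (user_chunks : List String) (limit : Int) : List String :=
  let step := max 1 (PySem.Int.floordiv (user_chunks.length : Int) limit)
  (PySem.List.slice? user_chunks none (some (limit * step)) step).getD []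

def smart_chunk_selection_alt (chunks_per_user : List (List String)) (max_total_chunks : Int) : List String :=
  let limit := max 1 (PySem.Int.floordiv max_total_chunks (chunks_per_user.length : Int))
  let selected := chunks_per_user.flatMap (fun user => pvSpaced user limit)
  let n : Int := selected.length
  if n ≤ max_total_chunks then selected
  else
    let halvings := PySem.Int.bitLength (-(PySem.Int.floordiv (-n) max_total_chunks) - 1)
    (PySem.List.slice? selected none none ((1 : Int) <<< halvings)).getD []

-- ===== PRECONDITION & SPEC =====

-- Pre_ is exactly the set of inputs on which Python A returns: chunks_per_user = [] raises
-- ZeroDivisionError, and for max_total_chunks ≤ 0 the trimming while-loop never terminates unless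
-- it runs on an empty selection, which happens exactly when max_total_chunks = 0 and every user's
-- chunk list is empty.
def Pre_smart_chunk_selection (chunks_per_user : List (List String)) (max_total_chunks : Int) : Prop :=
  chunks_per_user ≠ [] ∧
    (1 ≤ max_total_chunks ∨ (max_total_chunks = 0 ∧ ∀ u ∈ chunks_per_user, u = []))
instance (chunks_per_user : List (List String)) (max_total_chunks : Int) : Decidable (Pre_smart_chunk_selection chunks_per_user max_total_chunks) := by unfold Pre_smart_chunk_selection; infer_instance

def pvWitness_smart_chunk_selection : List (List String) × Int := ([["a", "b", "c"], ["d"]], 2)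

def Spec_smart_chunk_selection (chunks_per_user : List (List String)) (max_total_chunks : Int) (out : List String) : Prop := out = smart_chunk_selection_alt chunks_per_user max_total_chunks
instance (chunks_per_user : List (List String)) (max_total_chunks : Int) (out : List String) : Decidable (Spec_smart_chunk_selection chunks_per_user max_total_chunks out) := by unfold Spec_smart_chunk_selection; infer_instance

-- ===== CLAIM (what is proved, stated in full; the proofs are below) =====
def Claim_equal_smart_chunk_selection : Prop := ∀ (chunks_per_user : List (List String)) (max_total_chunks : Int), Dom_smart_chunk_selection chunks_per_user max_total_chunks → Pre_smart_chunk_selection chunks_per_user max_total_chunks → Spec_smart_chunk_selection chunks_per_user max_total_chunks (smart_chunk_selection chunks_per_user max_total_chunks)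

-- ===== LEMMAS AND PROOFS =====

-- ceiling division on Nat
def pvCeil (n s : Nat) : Nat := (n + s - 1) / s

-- every s-th element of xs: the common value of both ports' extended slices
def pvEvery (xs : List String) (s : Nat) : List String :=
  (List.range (pvCeil xs.length s)).map (fun k => xs.getD (s * k) "")

theorem pvCeil_le {s : Nat} (hs : 0 < s) (n y : Nat) : pvCeil n s ≤ y ↔ n ≤ y * s := by
  obtain ⟨t, rfl⟩ : ∃ t, s = t + 1 := ⟨s - 1, by omega⟩
  unfold pvCeil
  rw [Nat.div_le_iff_le_mul_add_pred (by omega)]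
  rw [show n + (t + 1) - 1 = n + t by omega, show t + 1 - 1 = t by omega, mul_comm (t + 1) y]
  exact Nat.add_le_add_iff_right

theorem lt_pvCeil {s : Nat} (hs : 0 < s) (n y : Nat) : y < pvCeil n s ↔ y * s < n := by
  rw [← Nat.not_le, ← Nat.not_le, pvCeil_le hs]

theorem n_le_pvCeil_mul {s : Nat} (hs : 0 < s) (n : Nat) : n ≤ pvCeil n s * s :=
  (pvCeil_le hs n _).mp le_rfl

theorem pvCeil_mono {s : Nat} (hs : 0 < s) {a b : Nat} (h : a ≤ b) : pvCeil a s ≤ pvCeil b s :=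
  (pvCeil_le hs _ _).mpr (le_trans h (n_le_pvCeil_mul hs b))

theorem pvCeil_mul_self {s : Nat} (hs : 0 < s) (L : Nat) : pvCeil (L * s) s = L := by
  unfold pvCeil
  rw [mul_comm, Nat.add_sub_assoc hs, Nat.mul_add_div hs, Nat.div_eq_of_lt (by omega), Nat.add_zero]

theorem le_pvCeil_of_mul_le {s : Nat} (hs : 0 < s) {y n : Nat} (h : y * s ≤ n) : y ≤ pvCeil n s := by
  have := pvCeil_mono hs h
  rwa [pvCeil_mul_self hs] at this

theorem pvCeil_comp {s t : Nat} (hs : 0 < s) (ht : 0 < t) (n : Nat) :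
    pvCeil (pvCeil n s) t = pvCeil n (s * t) := by
  apply le_antisymm
  · rw [pvCeil_le ht, pvCeil_le hs]
    calc n ≤ pvCeil n (s * t) * (s * t) := n_le_pvCeil_mul (Nat.mul_pos hs ht) n
      _ = pvCeil n (s * t) * t * s := by ring
  · rw [pvCeil_le (Nat.mul_pos hs ht)]
    calc n ≤ pvCeil n s * s := n_le_pvCeil_mul hs n
      _ ≤ pvCeil (pvCeil n s) t * t * s :=
        Nat.mul_le_mul_right s (n_le_pvCeil_mul ht (pvCeil n s))
      _ = pvCeil (pvCeil n s) t * (s * t) := by ring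

theorem pvCeil_min {s : Nat} (hs : 0 < s) (L n : Nat) :
    pvCeil (min (L * s) n) s = min L (pvCeil n s) := by
  rcases le_total (L * s) n with h | h
  · rw [min_eq_left h, pvCeil_mul_self hs, min_eq_left (le_pvCeil_of_mul_le hs h)]
  · rw [min_eq_right h, min_eq_right ((pvCeil_le hs n L).mpr h)]

-- xs[::s] for a positive step, as a filterMap (raw unfolding of slice?)
theorem slice?_raw (xs : List String) (s : Nat) (hs : 0 < s) :
    PySem.List.slice? xs none none ((s : Nat) : Int)
      = some ((List.range (pvCeil xs.length s)).filterMap (fun k => xs[s * k]?)) := by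
  unfold PySem.List.slice? PySem.List.sliceIndices
  rw [if_neg (show ¬((s : Nat) : Int) = 0 by omega)]
  simp only [if_neg (show ¬((s : Nat) : Int) < 0 by omega),
    if_pos (show (0 : Int) < (s : Nat) by omega)]
  have hcount : (if (0 : Int) < (xs.length : Int) then
      (((xs.length : Int) - 0 + s - 1) / s).toNat else 0) = pvCeil xs.length s := by
    unfold pvCeil
    split_ifs with hpos
    · rw [show ((xs.length : Int) - 0 + s - 1) = (((xs.length + s - 1 : Nat)) : Int) by omega,
        ← Int.natCast_div, Int.toNat_natCast]
    · have h0 : xs.length = 0 := by omega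
      rw [h0]
      exact (Nat.div_eq_of_lt (by omega)).symm
  rw [hcount]
  simp only [zero_add, ← Int.natCast_mul, Int.toNat_natCast]

theorem filterMap_get_eq_map (xs : List String) (s c : Nat) (hs : 0 < s)
    (hc : c ≤ pvCeil xs.length s) :
    (List.range c).filterMap (fun k => xs[s * k]?)
      = (List.range c).map (fun k => xs.getD (s * k) "") := by
  apply List.filterMap_eq_map_iff_forall_eq_some.mpr
  intro k hk
  rw [List.mem_range] at hk
  have hlt : s * k < xs.length := by
    have := (lt_pvCeil hs xs.length k).mp (lt_of_lt_of_le hk hc)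
    rwa [Nat.mul_comm] at this
  simp [List.getD_eq_getElem?_getD, List.getElem?_eq_getElem hlt]

theorem slice?_full (xs : List String) (S : Int) (hS : 0 < S) :
    PySem.List.slice? xs none none S = some (pvEvery xs S.toNat) := by
  obtain ⟨s, rfl⟩ : ∃ s : Nat, S = (s : Int) := ⟨S.toNat, (Int.toNat_of_nonneg hS.le).symm⟩
  have hs : 0 < s := by exact_mod_cast hS
  rw [slice?_raw xs s hs, Int.toNat_natCast, filterMap_get_eq_map xs s _ hs le_rfl]
  rfl

-- xs[:L*S:S] for positive L, S (raw unfolding of slice? with a stop bound)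
theorem slice?_raw_capped (xs : List String) (l s : Nat) (hs : 0 < s) :
    PySem.List.slice? xs none (some ((l : Int) * (s : Int))) ((s : Nat) : Int)
      = some ((List.range (pvCeil (min (l * s) xs.length) s)).filterMap (fun k => xs[s * k]?)) := by
  unfold PySem.List.slice? PySem.List.sliceIndices
  rw [if_neg (show ¬((s : Nat) : Int) = 0 by omega)]
  simp only [if_neg (show ¬((s : Nat) : Int) < 0 by omega),
    if_pos (show (0 : Int) < (s : Nat) by omega),
    if_neg (not_lt.mpr (show (0 : Int) ≤ (l : Int) * (s : Int) by positivity))]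
  have hmin : min ((l : Int) * (s : Int)) (xs.length : Int) = ((min (l * s) xs.length : Nat) : Int) := by
    push_cast
    rfl
  rw [hmin]
  have hcount : (if (0 : Int) < ((min (l * s) xs.length : Nat) : Int) then
      ((((min (l * s) xs.length : Nat) : Int) - 0 + s - 1) / s).toNat else 0)
      = pvCeil (min (l * s) xs.length) s := by
    unfold pvCeil
    split_ifs with hpos
    · rw [show (((min (l * s) xs.length : Nat) : Int) - 0 + s - 1)
          = (((min (l * s) xs.length + s - 1 : Nat)) : Int) by omega,
        ← Int.natCast_div, Int.toNat_natCast]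
    · have h0 : min (l * s) xs.length = 0 := by omega
      rw [h0]
      exact (Nat.div_eq_of_lt (by omega)).symm
  rw [hcount]
  simp only [zero_add, ← Int.natCast_mul, Int.toNat_natCast]

theorem slice?_capped (xs : List String) (L S : Int) (hL : 0 < L) (hS : 0 < S) :
    PySem.List.slice? xs none (some (L * S)) S = some ((pvEvery xs S.toNat).take L.toNat) := by
  obtain ⟨s, rfl⟩ : ∃ s : Nat, S = (s : Int) := ⟨S.toNat, (Int.toNat_of_nonneg hS.le).symm⟩
  obtain ⟨l, rfl⟩ : ∃ l : Nat, L = (l : Int) := ⟨L.toNat, (Int.toNat_of_nonneg hL.le).symm⟩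
  have hs : 0 < s := by exact_mod_cast hS
  rw [slice?_raw_capped xs l s hs, Int.toNat_natCast, Int.toNat_natCast,
    filterMap_get_eq_map xs s _ hs (by rw [pvCeil_min hs]; exact min_le_right _ _)]
  unfold pvEvery
  rw [← List.map_take, List.take_range, pvCeil_min hs]

theorem getD_pvEvery {s : Nat} (hs : 0 < s) (xs : List String) (j : Nat) :
    (pvEvery xs s).getD j "" = xs.getD (s * j) "" := by
  unfold pvEvery
  rcases lt_or_ge j (pvCeil xs.length s) with h | h
  · rw [List.getD_eq_getElem?_getD, List.getElem?_map, List.getElem?_range h]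
    simp [List.getD_eq_getElem?_getD]
  · have h1 : xs.length ≤ s * j := by
      have := (pvCeil_le hs xs.length j).mp h
      rwa [Nat.mul_comm] at this
    rw [List.getD_eq_getElem?_getD, List.getElem?_map, List.getElem?_eq_none (by simpa using h)]
    simp [List.getD_eq_getElem?_getD, List.getElem?_eq_none h1]

theorem pvEvery_comp {s t : Nat} (hs : 0 < s) (ht : 0 < t) (xs : List String) :
    pvEvery (pvEvery xs s) t = pvEvery xs (s * t) := by
  conv_lhs => rw [show pvEvery (pvEvery xs s) t = (List.range (pvCeil (pvEvery xs s).length t)).map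
    (fun k => (pvEvery xs s).getD (t * k) "") from rfl]
  rw [show (pvEvery xs s).length = pvCeil xs.length s by simp [pvEvery], pvCeil_comp hs ht]
  exact List.map_congr_left (fun k _ => by rw [getD_pvEvery hs, Nat.mul_assoc])

theorem ceil_int (nn M : Nat) (hM : 0 < M) :
    -(PySem.Int.floordiv (-(nn : Int)) (M : Int)) = (pvCeil nn M : Int) := by
  rw [PySem.Int.neg_floordiv_neg_eq_iff_of_pos (by exact_mod_cast hM)]
  constructor
  · rcases Nat.eq_zero_or_pos (pvCeil nn M) with h | h
    · rw [h]
      push_cast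
      omega
    · have hlt : (pvCeil nn M - 1) * M < nn := (lt_pvCeil hM nn _).mp (by omega)
      have h1 : (1 : Nat) ≤ pvCeil nn M := h
      zify [h1] at hlt
      exact hlt
  · exact_mod_cast n_le_pvCeil_mul hM nn

-- one halving step of the selection halves the (ceiling) quotient, so the bit length drops by one
theorem key_bitLength (M nn : Nat) (hM : 0 < M) (h : M < nn) :
    PySem.Int.bitLength ((pvCeil nn M - 1 : Nat) : Int)
      = PySem.Int.bitLength ((pvCeil (pvCeil nn 2) M - 1 : Nat) : Int) + 1 := by
  have hq2 : 2 ≤ pvCeil nn M := by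
    by_contra hc
    have h1 : pvCeil nn M ≤ 1 := by omega
    have := (pvCeil_le hM nn 1).mp h1
    omega
  have hq' : pvCeil (pvCeil nn 2) M = pvCeil (pvCeil nn M) 2 := by
    rw [pvCeil_comp (by omega) hM, pvCeil_comp hM (by omega), Nat.mul_comm]
  have h2 : pvCeil (pvCeil nn M) 2 - 1 = (pvCeil nn M - 1) / 2 := by
    unfold pvCeil
    omega
  rw [hq', h2]
  exact PySem.Int.bitLength_natCast (by omega)

-- B's tail expression evaluated to pvEvery form
theorem rhs_eval (sel : List String) (m : Int) (hm : 1 ≤ m) (h : m < (sel.length : Int)) :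
    (PySem.List.slice? sel none none
        ((1 : Int) <<< PySem.Int.bitLength (-(PySem.Int.floordiv (-(sel.length : Int)) m) - 1))).getD []
      = pvEvery sel (2 ^ PySem.Int.bitLength ((pvCeil sel.length m.toNat - 1 : Nat) : Int)) := by
  obtain ⟨M, rfl⟩ : ∃ M : Nat, m = (M : Int) := ⟨m.toNat, (Int.toNat_of_nonneg (by omega)).symm⟩
  have hM : 0 < M := by exact_mod_cast hm
  rw [ceil_int sel.length M hM, Int.toNat_natCast]
  have hq : (1 : Nat) ≤ pvCeil sel.length M := le_pvCeil_of_mul_le hM (by omega)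
  rw [show ((pvCeil sel.length M : Nat) : Int) - 1 = ((pvCeil sel.length M - 1 : Nat) : Int) by omega]
  set K := PySem.Int.bitLength ((pvCeil sel.length M - 1 : Nat) : Int) with hK
  rw [show (1 : Int) <<< K = ((2 ^ K : Nat) : Int) by rw [Int.shiftLeft_eq]; push_cast; ring]
  rw [slice?_full sel _ (by positivity), Option.getD_some, Int.toNat_natCast]

-- A's while-loop equals B's closed-form tail (for max_total_chunks ≥ 1)
theorem pvTrimA_eq (m : Int) (hm : 1 ≤ m) : ∀ (n : Nat) (sel : List String), sel.length ≤ n →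
    pvTrimA sel m = if (sel.length : Int) ≤ m then sel
      else (PySem.List.slice? sel none none
        ((1 : Int) <<< PySem.Int.bitLength (-(PySem.Int.floordiv (-(sel.length : Int)) m) - 1))).getD [] := by
  intro n
  induction n with
  | zero =>
    intro sel hlen
    have h0 : sel.length = 0 := by omega
    rw [pvTrimA, if_neg (by omega), if_pos (by omega)]
  | succ n ih =>
    intro sel hlen
    by_cases hc : (sel.length : Int) ≤ m
    · rw [pvTrimA, if_neg (by omega), if_pos hc]
    · push_neg at hc
      obtain ⟨M, hMdef⟩ : ∃ M : Nat, m = (M : Int) := ⟨m.toNat, (Int.toNat_of_nonneg (by omega)).symm⟩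
      subst hMdef
      have hM : 0 < M := by exact_mod_cast hm
      have hnn : M < sel.length := by exact_mod_cast hc
      have hs2 : (2 : Nat) ≤ sel.length := by omega
      rw [pvTrimA, if_pos (by omega)]
      have hslice : (PySem.List.slice? sel none none 2).getD [] = pvEvery sel 2 := by
        rw [show (2 : Int) = ((2 : Nat) : Int) from rfl, slice?_full sel _ (by omega),
          Option.getD_some, Int.toNat_natCast]
      simp only [hslice]
      have hlen2 : (pvEvery sel 2).length = pvCeil sel.length 2 := by simp [pvEvery]
      have hdec : (pvEvery sel 2).length < sel.length := by
        rw [hlen2]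
        unfold pvCeil
        omega
      rw [dif_pos hdec, ih _ (by omega),
        if_neg (show ¬ ((sel.length : Int) ≤ ((M : Nat) : Int)) by omega),
        rhs_eval sel ((M : Nat) : Int) hm hc, Int.toNat_natCast]
      have hn2pos : 0 < pvCeil sel.length 2 := (lt_pvCeil (by omega) sel.length 0).mpr (by omega)
      by_cases hsmall : ((pvEvery sel 2).length : Int) ≤ ((M : Nat) : Int)
      · rw [if_pos hsmall]
        have hq1 : pvCeil (pvCeil sel.length 2) M = 1 := by
          have hle : pvCeil (pvCeil sel.length 2) M ≤ 1 := by
            rw [pvCeil_le hM, Nat.one_mul]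
            rw [hlen2] at hsmall
            exact_mod_cast hsmall
          have hge : 0 < pvCeil (pvCeil sel.length 2) M :=
            (lt_pvCeil hM _ 0).mpr (by rw [Nat.zero_mul]; exact hn2pos)
          omega
        have hKone : PySem.Int.bitLength ((pvCeil sel.length M - 1 : Nat) : Int) = 1 := by
          rw [key_bitLength M sel.length hM hnn, hq1]
          simp [PySem.Int.bitLength_zero]
        rw [hKone]
        norm_num
      · rw [if_neg hsmall, rhs_eval (pvEvery sel 2) ((M : Nat) : Int) hm (by omega),
          Int.toNat_natCast, hlen2, key_bitLength M sel.length hM hnn, pow_succ,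
          Nat.mul_comm _ 2, ← pvEvery_comp (by omega : (0 : Nat) < 2) (by positivity) sel]

-- both ports build the same per-user selection
theorem user_eq (u : List String) (limit : Int) (hl : 1 ≤ limit) :
    PySem.List.slice
        ((PySem.List.slice? u none none (max 1 (PySem.Int.floordiv (u.length : Int) limit))).getD [])
        none (some limit)
      = pvSpaced u limit := by
  have hstep : 0 < max 1 (PySem.Int.floordiv (u.length : Int) limit) :=
    lt_of_lt_of_le one_pos (le_max_left _ _)
  unfold pvSpaced
  dsimp only
  rw [slice?_full u _ hstep, Option.getD_some, PySem.List.slice_to _ (by omega : (0 : Int) ≤ limit),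
    slice?_capped u limit _ (by omega) hstep, Option.getD_some]

theorem pvEvery_nil {s : Nat} (hs : 0 < s) : pvEvery [] s = [] := by
  unfold pvEvery pvCeil
  rw [List.length_nil, Nat.zero_add, Nat.div_eq_of_lt (by omega)]
  rfl

theorem pvSpaced_nil (limit : Int) (hl : 1 ≤ limit) : pvSpaced [] limit = [] := by
  have hstep : 0 < max 1 (PySem.Int.floordiv ((([] : List String).length) : Int) limit) :=
    lt_of_lt_of_le one_pos (le_max_left _ _)
  unfold pvSpaced
  dsimp only
  rw [slice?_capped [] limit _ (by omega) hstep, Option.getD_some, pvEvery_nil (by omega)]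
  simp

-- ===== VERDICT (by name: the statement is the Claim_ definition above) =====
theorem smart_chunk_selection_spec : Claim_equal_smart_chunk_selection := by
  intro chunks m _hdom hpre
  unfold Pre_smart_chunk_selection at hpre
  obtain ⟨_hne, hpre2⟩ := hpre
  unfold Spec_smart_chunk_selection smart_chunk_selection smart_chunk_selection_alt
  dsimp only
  rw [PySem.List.foldl_append_eq_flatMap, List.nil_append]
  rw [show (fun user_chunks => PySem.List.slice
        ((PySem.List.slice? user_chunks none none
            (max 1 (PySem.Int.floordiv ((user_chunks : List String).length : Int)
              (max 1 (PySem.Int.floordiv m (chunks.length : Int)))))).getD [])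
        none (some (max 1 (PySem.Int.floordiv m (chunks.length : Int)))))
      = (fun user => pvSpaced user (max 1 (PySem.Int.floordiv m (chunks.length : Int)))) from
    funext (fun u => user_eq u _ (le_max_left _ _))]
  rcases hpre2 with hm | ⟨hm0, hall⟩
  · exact pvTrimA_eq m hm _ _ le_rfl
  · subst hm0
    rw [show chunks.flatMap
        (fun user => pvSpaced user (max 1 (PySem.Int.floordiv 0 (chunks.length : Int)))) = [] from
      List.flatMap_eq_nil_iff.mpr (fun u hu => by rw [hall u hu]; exact pvSpaced_nil _ (le_max_left _ _))]
    rw [pvTrimA]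
    norm_num
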